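-- pv_equiv track=rewrite | github.com/innacohen/mod-annotation | code/1-2query-modeldb-mod-files-mini.py | extract_last_balanced_braces
-- ===== SOURCE A (Python) =====
-- def extract_last_balanced_braces(s):
--     count = 0
--     end = None
--     # Scan backwards to find the last closing brace
--     for i in range(len(s) - 1, -1, -1):
--         if s[i] == '}':
--             if end is None:
--                 end = i
--             count += 1
--         elif s[i] == '{':
--             if count > 0:
--                 count -= 1
--                 if count == 0:
--                     return s[i:end+1]
--     return None
-- ===== SOURCE B (Python) =====
-- def extract_last_balanced_braces(s):
--     # Pass 1: index of the last '}' and the prefix-balance target at it.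
--     e = -1
--     target = 0
--     bal = 0  # number of '}' minus number of '{' in s[:i]
--     for i, c in enumerate(s):
--         if c == '}':
--             e = i
--             target = bal + 1
--             bal += 1
--         elif c == '{':
--             bal -= 1
--     if e == -1:
--         return None
--     # Pass 2: last '{' before e whose prefix balance equals the target.
--     m = -1
--     bal = 0
--     for i in range(e):
--         c = s[i]
--         if c == '{':
--             if bal == target:
--                 m = i
--             bal -= 1
--         elif c == '}':
--             bal += 1
--     return s[m:e + 1] if m != -1 else None
-- ===== Notes on version B (the rewrite author's own statement) =====
-- stated objective: alternative
-- what changed: A's single backward scan with a matching counter and early return is replaced by two forward passes using prefix-balance arithmetic: pass 1 records the position of the last closing brace and the prefix balance just after it, pass 2 takes the last opening brace whose prefix balance equals that target.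
import Mathlib
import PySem

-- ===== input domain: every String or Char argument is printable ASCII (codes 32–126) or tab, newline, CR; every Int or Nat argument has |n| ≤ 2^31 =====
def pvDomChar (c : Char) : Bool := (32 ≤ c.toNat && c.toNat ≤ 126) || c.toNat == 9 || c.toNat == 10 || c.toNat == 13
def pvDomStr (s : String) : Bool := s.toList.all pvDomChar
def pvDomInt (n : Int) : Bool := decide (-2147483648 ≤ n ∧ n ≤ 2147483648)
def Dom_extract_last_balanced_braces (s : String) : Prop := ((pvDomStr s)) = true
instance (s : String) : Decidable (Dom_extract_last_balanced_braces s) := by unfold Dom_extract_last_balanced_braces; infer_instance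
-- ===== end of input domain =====

-- B replaces A's backward matching-counter scan by two forward passes over prefix balances (alternative algorithm, same O(n) cost).

-- ===== PORT A =====
-- the backward loop: indices in `idxs`, state (count, end?); returns the slice on the early `return`
def pvALoop (cs : List Char) (idxs : List Int) (count : Int) (end? : Option Int) : Option String :=
  match idxs with
  | [] => none
  | i :: rest =>
    if PySem.List.pyGetD cs i ' ' = '}' then   -- s[i]: i is always in range in this loop
      pvALoop cs rest (count + 1) (match end? with | none => some i | some _ => end?)
    else if PySem.List.pyGetD cs i ' ' = '{' then
      if count > 0 then
        if count - 1 = 0 then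
          match end? with
          | some e => some (String.mk (PySem.List.slice cs (some i) (some (e + 1))))  -- s[i:end+1]
          | none => none  -- unreachable: count > 0 implies end is not None
        else pvALoop cs rest (count - 1) end?
      else pvALoop cs rest count end?
    else pvALoop cs rest count end?

def extract_last_balanced_braces (s : String) : Option String :=
  pvALoop s.toList (PySem.List.pyRange (PySem.Str.len s - 1) (-1) (-1)) 0 none

-- ===== PORT B =====
-- pass 1: for i, c in enumerate(s); state (e, target, bal)
def pvBLoop1 (l : List (Int × Char)) (e target bal : Int) : Int × Int × Int :=
  match l with
  | [] => (e, target, bal)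
  | (i, c) :: rest =>
    if c = '}' then pvBLoop1 rest i (bal + 1) (bal + 1)
    else if c = '{' then pvBLoop1 rest e target (bal - 1)
    else pvBLoop1 rest e target bal

-- pass 2: for i in range(e); state (m, bal)
def pvBLoop2 (cs : List Char) (idxs : List Int) (m target bal : Int) : Int × Int :=
  match idxs with
  | [] => (m, bal)
  | i :: rest =>
    if PySem.List.pyGetD cs i ' ' = '{' then   -- s[i]: i is always in range in this loop
      pvBLoop2 cs rest (if bal = target then i else m) target (bal - 1)
    else if PySem.List.pyGetD cs i ' ' = '}' then pvBLoop2 cs rest m target (bal + 1)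
    else pvBLoop2 cs rest m target bal

def extract_last_balanced_braces_alt (s : String) : Option String :=
  match pvBLoop1 (PySem.List.enumerate s.toList 0) (-1) 0 0 with
  | (e, target, _) =>
    if e = -1 then none
    else
      match pvBLoop2 s.toList (PySem.List.pyRange 0 e 1) (-1) target 0 with
      | (m, _) =>
        if m ≠ -1 then some (String.mk (PySem.List.slice s.toList (some m) (some (e + 1))))
        else none

-- ===== PRECONDITION & SPEC =====
def Spec_extract_last_balanced_braces (s : String) (out : Option String) : Prop := out = extract_last_balanced_braces_alt s
instance (s : String) (out : Option String) : Decidable (Spec_extract_last_balanced_braces s out) := by unfold Spec_extract_last_balanced_braces; infer_instance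

-- ===== CLAIM (what is proved, stated in full; the proofs are below) =====
def Claim_equal_extract_last_balanced_braces : Prop := ∀ (s : String), Dom_extract_last_balanced_braces s → Spec_extract_last_balanced_braces s (extract_last_balanced_braces s)

-- ===== LEMMAS AND PROOFS =====

-- '}'-minus-'{' balance of a list of characters
def pvBal (l : List Char) : Int := (l.count '}' : Int) - (l.count '{' : Int)

-- index of the last '}' in cs, if any
def pvLlc (cs : List Char) : Option Nat :=
  match cs with
  | [] => none
  | c :: t =>
    match pvLlc t with
    | some k => some (k + 1)
    | none => if c = '}' then some 0 else none

-- largest i < q with cs[i] = '{' whose prefix balance equals the prefix balance at e+1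
def pvMg (cs : List Char) (e : Nat) : Nat → Option Nat
  | 0 => none
  | q + 1 =>
    if cs[q]? = some '{' ∧ pvBal (cs.take (e + 1)) = pvBal (cs.take q) then some q
    else pvMg cs e q

-- the common characterisation of both ports
def pvCharRes (cs : List Char) : Option String :=
  match pvLlc cs with
  | none => none
  | some e =>
    match pvMg cs e e with
    | none => none
    | some m => some (String.mk ((cs.drop m).take (e + 1 - m)))

theorem pvBal_nil : pvBal [] = 0 := by simp [pvBal]

theorem pvBal_cons (c : Char) (l : List Char) :
    pvBal (c :: l) = (if c = '}' then 1 else if c = '{' then (-1 : Int) else 0) + pvBal l := by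
  simp only [pvBal, List.count_cons]
  split_ifs with h1 h2 <;> simp_all <;> ring

theorem pvBal_append (l r : List Char) : pvBal (l ++ r) = pvBal l + pvBal r := by
  simp [pvBal, List.count_append]; ring

theorem pv_take_succ (cs : List Char) (q : Nat) (h : q < cs.length) :
    cs.take (q + 1) = cs.take q ++ [cs[q]] := by
  rw [List.take_succ]; simp [List.getElem?_eq_getElem h]

theorem pvBal_split (cs : List Char) (q j : Nat) (h : q ≤ j) :
    pvBal (cs.take j) = pvBal (cs.take q) + pvBal ((cs.drop q).take (j - q)) := by
  have h2 : j = q + (j - q) := by omega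
  rw [h2, List.take_add, pvBal_append]
  congr 3
  omega

theorem pv_seg_cons (cs : List Char) (q j : Nat) (hq : q < cs.length) (hj : q < j) :
    (cs.drop q).take (j - q) = cs[q] :: (cs.drop (q + 1)).take (j - (q + 1)) := by
  rw [List.drop_eq_getElem_cons hq]
  have h2 : j - q = (j - (q + 1)) + 1 := by omega
  rw [h2, List.take_succ_cons]

theorem pvLlc_append_singleton (l : List Char) (c : Char) :
    pvLlc (l ++ [c]) = if c = '}' then some l.length else pvLlc l := by
  induction l with
  | nil => simp [pvLlc]
  | cons a t ih =>
    simp only [List.cons_append, pvLlc, ih]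
    cases h : pvLlc t with
    | some k => split_ifs <;> simp
    | none => split_ifs <;> simp

theorem pvLlc_get (cs : List Char) (k : Nat) (h : pvLlc cs = some k) :
    k < cs.length ∧ cs[k]? = some '}' := by
  induction cs generalizing k with
  | nil => simp [pvLlc] at h
  | cons c t ih =>
    simp only [pvLlc] at h
    cases h' : pvLlc t with
    | some k' =>
      rw [h'] at h
      obtain rfl : k' + 1 = k := by simpa using h
      obtain ⟨h1, h2⟩ := ih k' h'
      exact ⟨by simpa using h1, by simpa using h2⟩
    | none =>
      rw [h'] at h
      by_cases hc : c = '}'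
      · simp [hc] at h
        obtain rfl : 0 = k := h
        simp [hc]
      · simp [hc] at h

theorem pvMg_skip (cs : List Char) (e q : Nat)
    (h : ¬ (cs[q]? = some '{' ∧ pvBal (cs.take (e + 1)) = pvBal (cs.take q))) :
    pvMg cs e (q + 1) = pvMg cs e q := by
  simp only [pvMg]
  rw [if_neg h]

-- main backward-scan lemma for port A, after the last '}' (at index e) has been seen
theorem pvA1 (cs : List Char) (e : Nat) (he : e < cs.length) :
    ∀ q : Nat, q ≤ e →
    (∀ r : Nat, q ≤ r → r ≤ e → 1 ≤ pvBal ((cs.drop r).take (e + 1 - r))) →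
    pvALoop cs (PySem.List.pyRange ((q : Int) - 1) (-1) (-1))
        (pvBal ((cs.drop q).take (e + 1 - q))) (some (e : Int))
      = (pvMg cs e q).map (fun m => String.mk ((cs.drop m).take (e + 1 - m))) := by
  intro q
  induction q with
  | zero =>
    intro _ _
    rw [PySem.List.pyRange_neg_one_eq_nil (by norm_num)]
    simp [pvALoop, pvMg]
  | succ q ih =>
    intro hq hH
    have hqlen : q < cs.length := by omega
    have hcast : ((q + 1 : Nat) : Int) - 1 = (q : Int) := by push_cast; ring
    rw [hcast, PySem.List.pyRange_neg_one_cons (by omega : (-1 : Int) < (q : Int))]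
    have hget : PySem.List.pyGetD cs ((q : Nat) : Int) ' ' = cs[q] := by
      simp [List.getD, List.getElem?_eq_getElem hqlen]
    have hrec := pv_seg_cons cs q (e + 1) hqlen (by omega)
    by_cases hbr : cs[q] = '}'
    · -- s[q] == '}'
      have hbal : pvBal ((cs.drop q).take (e + 1 - q))
          = pvBal ((cs.drop (q + 1)).take (e + 1 - (q + 1))) + 1 := by
        rw [hrec, pvBal_cons, hbr]; simp; ring
      have hH' : ∀ r : Nat, q ≤ r → r ≤ e → 1 ≤ pvBal ((cs.drop r).take (e + 1 - r)) := by
        intro r h1 h2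
        by_cases h3 : r = q
        · subst h3
          have := hH (r + 1) (by omega) (by omega)
          omega
        · exact hH r (by omega) h2
      simp only [pvALoop, hget]
      rw [if_pos hbr, ← hbal, ih (by omega) hH', pvMg_skip]
      simp [List.getElem?_eq_getElem hqlen, hbr]
    · by_cases hbo : cs[q] = '{'
      · -- s[q] == '{'
        have hbal : pvBal ((cs.drop q).take (e + 1 - q))
            = pvBal ((cs.drop (q + 1)).take (e + 1 - (q + 1))) - 1 := by
          rw [hrec, pvBal_cons, hbo]; simp; ring
        have hpos : 1 ≤ pvBal ((cs.drop (q + 1)).take (e + 1 - (q + 1))) :=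
          hH (q + 1) (by omega) (by omega)
        simp only [pvALoop, hget]
        rw [if_neg hbr, if_pos hbo, if_pos (by omega :
          pvBal ((cs.drop (q + 1)).take (e + 1 - (q + 1))) > 0)]
        by_cases hz : pvBal ((cs.drop q).take (e + 1 - q)) = 0
        · -- inner balance hits zero: early return
          rw [if_pos (by omega : pvBal ((cs.drop (q + 1)).take (e + 1 - (q + 1))) - 1 = 0)]
          have hcond : cs[q]? = some '{' ∧ pvBal (cs.take (e + 1)) = pvBal (cs.take q) := by
            refine ⟨by simp [List.getElem?_eq_getElem hqlen, hbo], ?_⟩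
            rw [pvBal_split cs q (e + 1) (by omega), hz]; ring
          have hmg : pvMg cs e (q + 1) = some q := by
            simp only [pvMg]; rw [if_pos hcond]
          rw [hmg]
          have hce : ((e : Nat) : Int) + 1 = ((e + 1 : Nat) : Int) := by push_cast; ring
          rw [hce, PySem.List.slice_natCast]
          simp
        · -- keep scanning with count - 1
          rw [if_neg (by omega :
            ¬ (pvBal ((cs.drop (q + 1)).take (e + 1 - (q + 1))) - 1 = 0))]
          have hH' : ∀ r : Nat, q ≤ r → r ≤ e → 1 ≤ pvBal ((cs.drop r).take (e + 1 - r)) := by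
            intro r h1 h2
            by_cases h3 : r = q
            · subst h3; omega
            · exact hH r (by omega) h2
          have harg : pvBal ((cs.drop (q + 1)).take (e + 1 - (q + 1))) - 1
              = pvBal ((cs.drop q).take (e + 1 - q)) := by omega
          rw [harg, ih (by omega) hH', pvMg_skip]
          intro hcond
          apply hz
          have h5 := hcond.2
          rw [pvBal_split cs q (e + 1) (by omega)] at h5
          omega
      · -- any other character: skip
        have hbal : pvBal ((cs.drop q).take (e + 1 - q))
            = pvBal ((cs.drop (q + 1)).take (e + 1 - (q + 1))) := by
          rw [hrec, pvBal_cons]; simp [hbr, hbo]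
        simp only [pvALoop, hget]
        rw [if_neg hbr, if_neg hbo]
        have hH' : ∀ r : Nat, q ≤ r → r ≤ e → 1 ≤ pvBal ((cs.drop r).take (e + 1 - r)) := by
          intro r h1 h2
          by_cases h3 : r = q
          · subst h3
            have := hH (r + 1) (by omega) (by omega)
            omega
          · exact hH r (by omega) h2
        rw [← hbal, ih (by omega) hH', pvMg_skip]
        simp [List.getElem?_eq_getElem hqlen, hbo]

-- the full backward scan of port A, before/after finding the last '}'
theorem pvA0 (cs : List Char) :
    ∀ q : Nat, q ≤ cs.length →
    pvALoop cs (PySem.List.pyRange ((q : Int) - 1) (-1) (-1)) 0 none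
      = (match pvLlc (cs.take q) with
         | none => none
         | some e => (pvMg cs e e).map (fun m => String.mk ((cs.drop m).take (e + 1 - m)))) := by
  intro q
  induction q with
  | zero =>
    intro _
    rw [PySem.List.pyRange_neg_one_eq_nil (by norm_num)]
    simp [pvALoop, pvLlc]
  | succ q ih =>
    intro hq
    have hqlen : q < cs.length := by omega
    have hcast : ((q + 1 : Nat) : Int) - 1 = (q : Int) := by push_cast; ring
    rw [hcast, PySem.List.pyRange_neg_one_cons (by omega : (-1 : Int) < (q : Int))]
    have hget : PySem.List.pyGetD cs ((q : Nat) : Int) ' ' = cs[q] := by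
      simp [List.getD, List.getElem?_eq_getElem hqlen]
    have htake : pvLlc (cs.take (q + 1)) = if cs[q] = '}' then some q else pvLlc (cs.take q) := by
      rw [pv_take_succ cs q hqlen, pvLlc_append_singleton]
      simp [List.length_take, Nat.min_eq_left (by omega : q ≤ cs.length)]
    by_cases hbr : cs[q] = '}'
    · -- found the last '}': hand over to pvA1 with e := q
      have hseg : pvBal ((cs.drop q).take (q + 1 - q)) = 1 := by
        rw [pv_seg_cons cs q (q + 1) hqlen (by omega), hbr]
        simp [pvBal_cons, pvBal_nil]
      have h1 := pvA1 cs q hqlen q (le_refl q)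
        (by
          intro r hr1 hr2
          obtain rfl : r = q := by omega
          rw [hseg])
      rw [hseg] at h1
      simp only [pvALoop, hget]
      rw [if_pos hbr, htake, if_pos hbr]
      simpa using h1
    · simp only [pvALoop, hget]
      rw [if_neg hbr, htake, if_neg hbr]
      by_cases hbo : cs[q] = '{'
      · rw [if_pos hbo, if_neg (by norm_num : ¬ ((0 : Int) > 0)), ih (by omega)]
      · rw [if_neg hbo, ih (by omega)]

-- pass 1 of port B: last '}' position and the prefix balance just after it
theorem pvB1 (t : List Char) : ∀ (i e target bal : Int),
    pvBLoop1 (PySem.List.enumerate t i) e target bal =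
      (match pvLlc t with
       | none => (e, target, bal + pvBal t)
       | some k => (i + (k : Int), bal + pvBal (t.take k) + 1, bal + pvBal t)) := by
  induction t with
  | nil =>
    intro i e target bal
    simp [PySem.List.enumerate_nil, pvBLoop1, pvLlc, pvBal_nil]
  | cons c t ih =>
    intro i e target bal
    rw [PySem.List.enumerate_cons]
    by_cases h1 : c = '}'
    · simp only [pvBLoop1]
      rw [if_pos h1, ih]
      cases h' : pvLlc t with
      | none =>
        simp only [pvLlc, h', if_pos h1]
        simp [pvBal_cons, pvBal_nil, h1]
        and_intros <;> push_cast <;> ring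
      | some k =>
        simp only [pvLlc, h']
        have ht : (c :: t).take (k + 1) = c :: t.take k := List.take_succ_cons
        simp [ht, pvBal_cons, pvBal_nil, h1]
        and_intros <;> push_cast <;> ring
    · by_cases h2 : c = '{'
      · simp only [pvBLoop1]
        rw [if_neg h1, if_pos h2, ih]
        cases h' : pvLlc t with
        | none =>
          simp only [pvLlc, h', if_neg h1]
          simp [pvBal_cons, pvBal_nil, h1, h2]
          and_intros <;> push_cast <;> ring
        | some k =>
          simp only [pvLlc, h']
          have ht : (c :: t).take (k + 1) = c :: t.take k := List.take_succ_cons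
          simp [ht, pvBal_cons, pvBal_nil, h1, h2]
          and_intros <;> push_cast <;> ring
      · simp only [pvBLoop1]
        rw [if_neg h1, if_neg h2, ih]
        cases h' : pvLlc t with
        | none =>
          simp only [pvLlc, h', if_neg h1]
          simp [pvBal_cons, pvBal_nil, h1, h2]
        | some k =>
          simp only [pvLlc, h']
          have ht : (c :: t).take (k + 1) = c :: t.take k := List.take_succ_cons
          simp [ht, pvBal_cons, pvBal_nil, h1, h2]
          and_intros <;> push_cast <;> ring

-- the Int-valued candidate (-1 = "no match yet") maintained by pass 2 of port B
def pvMgI (cs : List Char) (e q : Nat) : Int :=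
  match pvMg cs e q with
  | none => -1
  | some k => (k : Int)

-- pass 2 of port B
theorem pvB2 (cs : List Char) (e : Nat) (he : e < cs.length) :
    ∀ d q : Nat, q + d = e →
    pvBLoop2 cs (PySem.List.pyRange ((q : Nat) : Int) ((e : Nat) : Int) 1) (pvMgI cs e q)
        (pvBal (cs.take (e + 1))) (pvBal (cs.take q))
      = (pvMgI cs e e, pvBal (cs.take e)) := by
  intro d
  induction d with
  | zero =>
    intro q hq
    obtain rfl : q = e := by omega
    rw [PySem.List.pyRange_one_eq_nil (le_refl _)]
    simp [pvBLoop2]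
  | succ d ih =>
    intro q hq
    have hqe : q < e := by omega
    have hqlen : q < cs.length := by omega
    rw [PySem.List.pyRange_one_cons (by exact_mod_cast hqe : ((q : Nat) : Int) < ((e : Nat) : Int))]
    have hget : PySem.List.pyGetD cs ((q : Nat) : Int) ' ' = cs[q] := by
      simp [List.getD, List.getElem?_eq_getElem hqlen]
    have hstep : ((q : Nat) : Int) + 1 = ((q + 1 : Nat) : Int) := by push_cast; ring
    have hq? : cs[q]? = some cs[q] := List.getElem?_eq_getElem hqlen
    by_cases hbo : cs[q] = '{'
    · simp only [pvBLoop2]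
      rw [hget, if_pos hbo]
      have hm : (if pvBal (cs.take q) = pvBal (cs.take (e + 1)) then ((q : Nat) : Int)
          else pvMgI cs e q) = pvMgI cs e (q + 1) := by
        unfold pvMgI
        simp only [pvMg]
        by_cases h2 : pvBal (cs.take (e + 1)) = pvBal (cs.take q)
        · rw [if_pos h2.symm, if_pos ⟨by rw [hq?, hbo], h2⟩]
        · rw [if_neg (fun h => h2 h.symm), if_neg (fun hc => h2 hc.2)]
      have hb : pvBal (cs.take q) - 1 = pvBal (cs.take (q + 1)) := by
        rw [pv_take_succ cs q hqlen, pvBal_append, pvBal_cons, hbo, pvBal_nil]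
        simp
        ring
      rw [hm, hb, hstep, ih (q + 1) (by omega)]
    · by_cases hbr : cs[q] = '}'
      · simp only [pvBLoop2]
        rw [hget, if_neg (by rw [hbr]; decide), if_pos hbr]
        have hm : pvMgI cs e q = pvMgI cs e (q + 1) := by
          unfold pvMgI
          simp only [pvMg]
          rw [if_neg (fun hc => by rw [hq?, hbr] at hc; exact absurd hc.1 (by decide))]
        have hb : pvBal (cs.take q) + 1 = pvBal (cs.take (q + 1)) := by
          rw [pv_take_succ cs q hqlen, pvBal_append, pvBal_cons, hbr, pvBal_nil]
          simp
        rw [hm, hb, hstep, ih (q + 1) (by omega)]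
      · simp only [pvBLoop2]
        rw [hget, if_neg hbo, if_neg hbr]
        have hm : pvMgI cs e q = pvMgI cs e (q + 1) := by
          unfold pvMgI
          simp only [pvMg]
          rw [if_neg (fun hc => by rw [hq?] at hc; exact hbo (by simpa using hc.1))]
        have hb : pvBal (cs.take q) = pvBal (cs.take (q + 1)) := by
          rw [pv_take_succ cs q hqlen, pvBal_append, pvBal_cons, pvBal_nil]
          simp [hbo, hbr]
        rw [hm]
        conv_lhs => rw [hb]
        rw [hstep, ih (q + 1) (by omega)]
theorem pv_charA (cs : List Char) :
    pvALoop cs (PySem.List.pyRange ((cs.length : Int) - 1) (-1) (-1)) 0 none = pvCharRes cs := by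
  have h := pvA0 cs cs.length (le_refl _)
  rw [List.take_length] at h
  rw [h]
  unfold pvCharRes
  cases pvLlc cs with
  | none => rfl
  | some e =>
    cases hm : pvMg cs e e with
    | none => simp [hm]
    | some m => simp [hm]

theorem pv_charB (s : String) :
    extract_last_balanced_braces_alt s = pvCharRes s.toList := by
  unfold extract_last_balanced_braces_alt pvCharRes
  rw [pvB1]
  cases hl : pvLlc s.toList with
  | none => simp
  | some k =>
    obtain ⟨hk, hck⟩ := pvLlc_get _ k hl
    have hcq : s.toList[k] = '}' := by
      rw [List.getElem?_eq_getElem hk] at hck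
      simpa using hck
    have hE : (0 : Int) + ((k : Nat) : Int) = ((k : Nat) : Int) := by ring
    simp only [hE]
    rw [if_neg (by omega : ¬ ((k : Nat) : Int) = -1)]
    have htar : (0 : Int) + pvBal (s.toList.take k) + 1 = pvBal (s.toList.take (k + 1)) := by
      rw [pv_take_succ _ k hk, pvBal_append, pvBal_cons, hcq, pvBal_nil]
      simp
    rw [htar]
    have h2 := pvB2 s.toList k hk k 0 (by omega)
    have hm0 : pvMgI s.toList k 0 = -1 := rfl
    have hb0 : pvBal (s.toList.take 0) = 0 := by simp [pvBal_nil]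
    rw [hm0, hb0] at h2
    simp only [Nat.cast_zero] at h2
    rw [h2]
    cases hmg : pvMg s.toList k k with
    | none =>
      have hz : pvMgI s.toList k k = -1 := by unfold pvMgI; rw [hmg]
      rw [hz]
      simp
    | some j =>
      have hji : pvMgI s.toList k k = (j : Int) := by unfold pvMgI; rw [hmg]
      rw [hji]
      rw [if_pos (by omega : ((j : Nat) : Int) ≠ -1)]
      have hce : ((k : Nat) : Int) + 1 = ((k + 1 : Nat) : Int) := by push_cast; ring
      rw [hce, PySem.List.slice_natCast]

-- ===== VERDICT (by name: the statement is the Claim_ definition above) =====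
theorem extract_last_balanced_braces_spec : Claim_equal_extract_last_balanced_braces := by
  intro s _
  unfold Spec_extract_last_balanced_braces extract_last_balanced_braces
  rw [pv_charB]
  have h : PySem.Str.len s = (s.toList.length : Int) := by
    simp [PySem.Str.len_eq]
  rw [h, pv_charA]
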